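-- pv_equiv track=rewrite | github.com/Pulkitg64/Text-Steganography | Crypto and steno.py | prepare_input
-- ===== SOURCE A (Python) =====
-- import string
--
-- def prepare_input(dirty):
--     """
--     Prepare the plaintext by up-casing it
--     and separating repeated letters with X's
--     """
--
--     dirty = ''.join([c.upper() for c in dirty if c in string.ascii_letters])
--     clean = ""
--
--     if len(dirty) < 2:
--         return dirty
--
--     for i in range(len(dirty)-1):
--         clean += dirty[i]
--
--         if dirty[i] == dirty[i+1]:
--             clean += 'X'
--
--     clean += dirty[-1]
--
--     if len(clean) & 1:
--         clean += 'X'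
--
--     return clean
-- ===== SOURCE B (Python) =====
-- import string
--
-- def prepare_input(dirty):
--     """
--     Prepare the plaintext by up-casing it
--     and separating repeated letters with X's
--     """
--     d = ''.join(c.upper() for c in dirty if c in string.ascii_letters)
--     if len(d) < 2:
--         return d
--     # split into maximal runs of the same letter and join each run with 'X'
--     parts = []
--     i = 0
--     while i < len(d):
--         j = i + 1
--         while j < len(d) and d[j] == d[i]:
--             j += 1
--         parts.append('X'.join(d[i:j]))
--         i = j
--     clean = ''.join(parts)
--     if len(clean) & 1:
--         clean += 'X'
--     return clean
-- ===== Notes on version B (the rewrite author's own statement) =====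
-- stated objective: alternative
-- what changed: Replaces A's single index loop that appends the separator letter after each character equal to its successor by splitting the cleaned text into maximal runs of one letter and joining each run with the separator letter.
import Mathlib
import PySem

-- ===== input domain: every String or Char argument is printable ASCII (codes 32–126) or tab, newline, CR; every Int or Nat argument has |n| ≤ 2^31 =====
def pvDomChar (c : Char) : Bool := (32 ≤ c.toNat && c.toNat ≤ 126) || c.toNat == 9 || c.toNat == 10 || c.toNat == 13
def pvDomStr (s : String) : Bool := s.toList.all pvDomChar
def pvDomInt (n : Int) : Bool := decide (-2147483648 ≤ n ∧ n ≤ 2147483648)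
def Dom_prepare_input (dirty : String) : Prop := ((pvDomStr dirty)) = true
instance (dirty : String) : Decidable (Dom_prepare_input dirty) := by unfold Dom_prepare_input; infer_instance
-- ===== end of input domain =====

-- B replaces A's index loop (append 'X' between each equal adjacent pair) by splitting
-- into maximal runs of one letter and joining each run with 'X'; objective: alternative.

-- string.ascii_letters
def asciiLetters : List Char := "abcdefghijklmnopqrstuvwxyzABCDEFGHIJKLMNOPQRSTUVWXYZ".toList

-- shared filter/upper line: ''.join(c.upper() for c in dirty if c in string.ascii_letters)
def cleanLetters (dirty : String) : List Char :=
  (dirty.toList.filter (fun c => asciiLetters.contains c)).map Char.toUpper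

-- ===== PORT A =====
-- 'for i in range(len(dirty)-1): clean += dirty[i]; if dirty[i]==dirty[i+1]: clean += "X"'
-- as the obvious structural recursion over the adjacent pairs of the list
def aLoop : List Char → List Char
  | a :: b :: rest => (a :: if a == b then ['X'] else []) ++ aLoop (b :: rest)
  | _ => []

def prepare_input (dirty : String) : String :=
  let d := cleanLetters dirty
  if d.length < 2 then String.ofList d
  else
    -- clean built by the loop, then 'clean += dirty[-1]'
    let clean := aLoop d ++ (match d.getLast? with | some c => [c] | none => [])
    -- 'if len(clean) & 1: clean += "X"'
    let clean := if clean.length % 2 == 1 then clean ++ ['X'] else clean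
    String.ofList clean

-- ===== PORT B =====
-- split into maximal runs of equal consecutive letters (Source B's two-index while loops)
def bRuns : List Char → List (List Char)
  | [] => []
  | c :: rest =>
      let s := rest.span (fun d => d == c)
      (c :: s.1) :: bRuns s.2
termination_by l => l.length
decreasing_by
  simp only [List.span_eq_takeWhile_dropWhile]
  have := List.length_dropWhile_le (p := fun d => d == c) (l := rest)
  simp; omega

def prepare_input_alt (dirty : String) : String :=
  let d := cleanLetters dirty
  if d.length < 2 then String.ofList d
  else
    let clean := (bRuns d).flatMap (fun r => List.intersperse 'X' r)
    let clean := if clean.length % 2 == 1 then clean ++ ['X'] else clean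
    String.ofList clean

-- ===== PRECONDITION & SPEC =====
def Spec_prepare_input (dirty : String) (out : String) : Prop := out = prepare_input_alt dirty
instance (dirty : String) (out : String) : Decidable (Spec_prepare_input dirty out) := by unfold Spec_prepare_input; infer_instance

-- ===== CLAIM (what is proved, stated in full; the proofs are below) =====
def Claim_equal_prepare_input : Prop := ∀ (dirty : String), Dom_prepare_input dirty → Spec_prepare_input dirty (prepare_input dirty)

-- ===== LEMMAS AND PROOFS =====

lemma bRuns_eq (c : Char) (rest : List Char) :
    bRuns (c :: rest) =
      (c :: rest.takeWhile (fun d => d == c)) :: bRuns (rest.dropWhile (fun d => d == c)) := by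
  rw [bRuns]; simp [List.span_eq_takeWhile_dropWhile]

lemma key (t : List Char) : ∀ (a : Char),
    (bRuns (a :: t)).flatMap (fun r => List.intersperse 'X' r) =
      aLoop (a :: t) ++ (match (a :: t).getLast? with | some c => [c] | none => []) := by
  induction t with
  | nil => intro a; simp [bRuns_eq, bRuns, aLoop, List.intersperse]
  | cons b s ih =>
    intro a
    by_cases h : a == b
    · have hab : a = b := beq_iff_eq.mp h
      subst hab
      rw [bRuns_eq]
      simp only [List.takeWhile_cons, List.dropWhile_cons, beq_self_eq_true, if_pos,
        List.flatMap_cons, List.intersperse]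
      have hb := ih a
      rw [bRuns_eq, List.flatMap_cons] at hb
      rw [aLoop, if_pos (by simp)]
      simp only [List.getLast?_cons_cons, List.cons_append, List.append_assoc] at hb ⊢
      rw [hb]
      simp
    · have hba : (b == a) = false := by
        simp only [beq_eq_false_iff_ne]
        exact fun e => h (by simp [e])
      rw [bRuns_eq]
      simp only [List.takeWhile_cons, List.dropWhile_cons, hba, if_neg Bool.false_ne_true,
        List.flatMap_cons, List.intersperse, List.singleton_append]
      rw [ih b]
      rw [aLoop, if_neg (by simp [h])]
      simp [List.getLast?_cons_cons]

-- ===== VERDICT (by name: the statement is the Claim_ definition above) =====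
theorem prepare_input_spec : Claim_equal_prepare_input := by
  intro dirty _
  unfold Spec_prepare_input prepare_input prepare_input_alt
  cases hd : cleanLetters dirty with
  | nil => simp
  | cons a t => simp [key t a]
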